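-- pv_equiv track=rewrite | github.com/MrBrantCode/unitest_baseline | mut_generate/mist_train_cf/cf_26642/solution.py | count_traits
-- ===== SOURCE A (Python) =====
-- def count_traits(traits):
--     trait_frequency = {}
--     for trait in traits:
--         trait_lower = trait.lower()  # Convert trait to lowercase for case insensitivity
--         if trait_lower in trait_frequency:
--             trait_frequency[trait_lower] += 1
--         else:
--             trait_frequency[trait_lower] = 1
--     return trait_frequency
-- ===== SOURCE B (Python) =====
-- def count_traits(traits):
--     lows = [t.lower() for t in traits]
--     return {k: lows.count(k) for k in dict.fromkeys(lows)}
-- ===== Notes on version B (the rewrite author's own statement) =====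
-- stated objective: alternative
-- what changed: Instead of incrementally updating a counter dict per element, B lowercases once, deduplicates the keys in first-occurrence order via dict.fromkeys, and builds the result with one list.count per distinct key.
import Mathlib
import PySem

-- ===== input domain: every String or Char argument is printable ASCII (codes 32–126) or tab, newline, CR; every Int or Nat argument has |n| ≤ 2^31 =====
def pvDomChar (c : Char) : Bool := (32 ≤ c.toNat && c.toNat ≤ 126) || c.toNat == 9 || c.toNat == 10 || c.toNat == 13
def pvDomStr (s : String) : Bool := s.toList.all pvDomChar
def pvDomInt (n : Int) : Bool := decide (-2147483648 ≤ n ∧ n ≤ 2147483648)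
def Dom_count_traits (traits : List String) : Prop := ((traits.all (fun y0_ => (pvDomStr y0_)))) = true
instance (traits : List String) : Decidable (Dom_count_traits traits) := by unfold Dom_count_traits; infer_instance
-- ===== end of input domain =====

-- B builds the same counts by dedup + per-key list.count instead of A's incremental counter dict; objective: alternative.

-- ===== PORT A =====
def count_traits (traits : List String) : List (String × Int) :=
  (traits.foldl
    (fun d trait =>
      let trait_lower := PySem.Str.lower trait
      if d.contains trait_lower then
        d.insert trait_lower ((d.get? trait_lower).getD 0 + 1)
      else
        d.insert trait_lower 1)
    PySem.Dict.empty).items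

-- ===== PORT B =====
def count_traits_alt (traits : List String) : List (String × Int) :=
  let lows := traits.map PySem.Str.lower
  ((PySem.List.dedup lows).foldl
    (fun d k => d.insert k ((lows.count k : Int))) PySem.Dict.empty).items

-- ===== PRECONDITION & SPEC =====
def Spec_count_traits (traits : List String) (out : List (String × Int)) : Prop := out = count_traits_alt traits
instance (traits : List String) (out : List (String × Int)) : Decidable (Spec_count_traits traits out) := by unfold Spec_count_traits; infer_instance

-- ===== CLAIM (what is proved, stated in full; the proofs are below) =====
def Claim_equal_count_traits : Prop := ∀ (traits : List String), Dom_count_traits traits → Spec_count_traits traits (count_traits traits)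

-- ===== LEMMAS AND PROOFS =====

-- A's branching update is exactly the Counter step 'insert k (getD k 0 + 1)'.
theorem countA_eq_counter_items (traits : List String) :
    count_traits traits = (PySem.Dict.counter (traits.map PySem.Str.lower)).items := by
  unfold count_traits
  rw [← PySem.Dict.foldl_insert_getD_add_one_eq_counter, List.foldl_map]
  congr 1
  apply PySem.List.foldl_congr_mem
  intro d t _
  by_cases h : d.contains (PySem.Str.lower t)
  · simp [h, PySem.Dict.getD_eq_get?_getD]
  · simp [h, PySem.Dict.getD_of_not_contains d 0 (by simpa using h)]

-- B's fold over the deduplicated (hence fresh, nodup) keys appends one item per key.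
theorem countB_eq_map (traits : List String) :
    count_traits_alt traits =
      (PySem.Set.ofList (traits.map PySem.Str.lower)).map
        (fun k => (k, ((traits.map PySem.Str.lower).count k : Int))) := by
  show ((PySem.Set.ofList (traits.map PySem.Str.lower)).foldl
      (fun d k => d.insert k (((traits.map PySem.Str.lower).count k : Int))) PySem.Dict.empty).items = _
  rw [PySem.Dict.items_foldl_insert_fresh (PySem.Set.ofList (traits.map PySem.Str.lower))
      (fun k => k) (fun k => ((traits.map PySem.Str.lower).count k : Int)) PySem.Dict.empty
      (by intro a _; simp [PySem.Dict.contains_empty])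
      (by simp)]
  rfl

-- ===== VERDICT (by name: the statement is the Claim_ definition above) =====
theorem count_traits_spec : Claim_equal_count_traits := by
  intro traits _
  unfold Spec_count_traits
  rw [countA_eq_counter_items, countB_eq_map, PySem.Dict.items_counter]
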